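-- pv_equiv track=rewrite | github.com/THEman6989/ai-stack | langgraph-app/file_safety.py | _system_path_category
-- ===== SOURCE A (Python) =====
-- SYSTEM_PREFIXES_POSIX = {
--     "/bin",
--     "/boot",
--     "/dev",
--     "/etc",
--     "/lib",
--     "/lib64",
--     "/proc",
--     "/root",
--     "/run",
--     "/sbin",
--     "/sys",
--     "/usr/bin",
--     "/usr/lib",
--     "/usr/local/bin",
--     "/var/lib",
--     "/var/run",
-- }
--
-- SYSTEM_PREFIXES_WINDOWS = {
--     "c:/windows",
--     "c:/program files",
--     "c:/program files (x86)",
--     "c:/programdata",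
-- }
--
-- def _system_path_category(normalized_path: str) -> str:
--     for prefix in SYSTEM_PREFIXES_POSIX:
--         normalized = prefix.lower().rstrip("/")
--         if normalized_path == normalized or normalized_path.startswith(normalized + "/"):
--             return "system_path"
--     for prefix in SYSTEM_PREFIXES_WINDOWS:
--         normalized = prefix.rstrip("/")
--         if normalized_path == normalized or normalized_path.startswith(normalized + "/"):
--             return "system_path"
--     return ""
-- ===== SOURCE B (Python) =====
-- SYSTEM_PREFIXES_POSIX = {
--     "/bin", "/boot", "/dev", "/etc", "/lib", "/lib64", "/proc", "/root",
--     "/run", "/sbin", "/sys", "/usr/bin", "/usr/lib", "/usr/local/bin",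
--     "/var/lib", "/var/run",
-- }
--
-- SYSTEM_PREFIXES_WINDOWS = {
--     "c:/windows", "c:/program files", "c:/program files (x86)", "c:/programdata",
-- }
--
-- SYSTEM_PREFIXES_ALL = frozenset(
--     {p.lower().rstrip("/") for p in SYSTEM_PREFIXES_POSIX}
--     | {p.rstrip("/") for p in SYSTEM_PREFIXES_WINDOWS}
-- )
--
--
-- def _system_path_category(normalized_path: str) -> str:
--     # Ancestor prefixes of the path, cut exactly at '/' positions.
--     candidates = {normalized_path}
--     for i, ch in enumerate(normalized_path):
--         if ch == "/":
--             candidates.add(normalized_path[:i])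
--     return "system_path" if candidates & SYSTEM_PREFIXES_ALL else ""
-- ===== Notes on version B (the rewrite author's own statement) =====
-- stated objective: alternative
-- what changed: Instead of scanning all 20 prefixes with startswith per call, B precomputes one normalized frozenset and enumerates the path's ancestor prefixes cut at '/' positions, testing set membership.
import Mathlib
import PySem

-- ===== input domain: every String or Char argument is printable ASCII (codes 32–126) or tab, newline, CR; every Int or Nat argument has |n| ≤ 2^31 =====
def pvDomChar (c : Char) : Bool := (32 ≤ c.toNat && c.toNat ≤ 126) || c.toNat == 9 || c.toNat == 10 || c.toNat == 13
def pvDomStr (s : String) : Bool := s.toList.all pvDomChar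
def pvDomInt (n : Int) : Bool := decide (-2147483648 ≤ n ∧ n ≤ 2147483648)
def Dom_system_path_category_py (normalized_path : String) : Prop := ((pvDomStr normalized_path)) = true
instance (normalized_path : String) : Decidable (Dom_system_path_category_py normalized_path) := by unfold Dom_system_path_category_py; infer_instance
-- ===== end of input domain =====

-- B replaces A's per-prefix startswith scan by one precomputed normalized prefix set
-- intersected with the set of the path's ancestor cuts at '/' positions (objective: alternative).

-- Module constants shared by both Pythons (Python set literals; both programs use them
-- order-independently, so a fixed list is exact).
def pvPosixPrefixes : List String :=
  ["/bin", "/boot", "/dev", "/etc", "/lib", "/lib64", "/proc", "/root",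
   "/run", "/sbin", "/sys", "/usr/bin", "/usr/lib", "/usr/local/bin",
   "/var/lib", "/var/run"]

def pvWindowsPrefixes : List String :=
  ["c:/windows", "c:/program files", "c:/program files (x86)", "c:/programdata"]

-- hand port of Python's s.rstrip("/") (single-character strip set): drop trailing '/'; exact.
def pvRstripSlash (cs : List Char) : List Char := (cs.reverse.dropWhile (· == '/')).reverse

-- ===== PORT A =====
def pvLoopPosix (path : List Char) : List String → Option String
  | [] => none
  | p :: rest =>
    let n := pvRstripSlash (PySem.Chars.lower p.toList)
    if path == n || PySem.Chars.startswith path (n ++ ['/']) then some "system_path"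
    else pvLoopPosix path rest

def pvLoopWindows (path : List Char) : List String → Option String
  | [] => none
  | p :: rest =>
    let n := pvRstripSlash p.toList
    if path == n || PySem.Chars.startswith path (n ++ ['/']) then some "system_path"
    else pvLoopWindows path rest

def system_path_category_py (normalized_path : String) : String :=
  match pvLoopPosix normalized_path.toList pvPosixPrefixes with
  | some r => r
  | none =>
    match pvLoopWindows normalized_path.toList pvWindowsPrefixes with
    | some r => r
    | none => ""

-- ===== PORT B =====
-- SYSTEM_PREFIXES_ALL: every POSIX prefix lowered and rstripped plus every Windows prefix rstripped.
def pvAllPrefixes : PySem.Set (List Char) :=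
  PySem.Set.ofList
    (pvPosixPrefixes.map (fun p => pvRstripSlash (PySem.Chars.lower p.toList))
      ++ pvWindowsPrefixes.map (fun p => pvRstripSlash p.toList))

-- candidates: the path itself and each cut path[:i] where path[i] = '/'.
def pvCandidates (path : List Char) : PySem.Set (List Char) :=
  PySem.Set.ofList
    (path :: (List.range path.length).filterMap
      (fun i => if path[i]? == some '/' then some (path.take i) else none))

def system_path_category_py_alt (normalized_path : String) : String :=
  if PySem.Set.inter (pvCandidates normalized_path.toList) pvAllPrefixes ≠ [] then "system_path"
  else ""

-- ===== PRECONDITION & SPEC =====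
def Spec_system_path_category_py (normalized_path : String) (out : String) : Prop := out = system_path_category_py_alt normalized_path
instance (normalized_path : String) (out : String) : Decidable (Spec_system_path_category_py normalized_path out) := by unfold Spec_system_path_category_py; infer_instance

-- ===== CLAIM (what is proved, stated in full; the proofs are below) =====
def Claim_equal_system_path_category_py : Prop := ∀ (normalized_path : String), Dom_system_path_category_py normalized_path → Spec_system_path_category_py normalized_path (system_path_category_py normalized_path)

-- ===== LEMMAS AND PROOFS =====

lemma pv_prefix_iff_cut (path n : List Char) :
    ((n ++ ['/']) <+: path) ↔ ∃ i, i < path.length ∧ path[i]? = some '/' ∧ path.take i = n := by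
  constructor
  · rintro ⟨t, ht⟩
    refine ⟨n.length, ?_, ?_, ?_⟩
    · rw [← ht]; simp [List.length_append]
    · rw [← ht, List.append_assoc, List.getElem?_append_right (Nat.le_refl _)]; simp
    · rw [← ht, List.append_assoc, List.take_left]
  · rintro ⟨i, hi, hget, htake⟩
    have h1 : path.take (i + 1) = n ++ ['/'] := by
      rw [List.take_add_one, htake, hget]; rfl
    exact h1 ▸ List.take_prefix (i + 1) path

lemma pv_mem_candidates (path n : List Char) :
    n ∈ pvCandidates path ↔ (path = n ∨ (n ++ ['/']) <+: path) := by
  unfold pvCandidates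
  rw [PySem.Set.mem_ofList]
  simp only [List.mem_cons, List.mem_filterMap, List.mem_range]
  constructor
  · rintro (h | ⟨i, hi, hif⟩)
    · exact Or.inl h.symm
    · right; rw [pv_prefix_iff_cut]
      by_cases hc : path[i]? == some '/'
      · rw [if_pos hc] at hif
        exact ⟨i, hi, by simpa using hc, by simpa using hif⟩
      · rw [if_neg hc] at hif; exact absurd hif (by simp)
  · rintro (h | hpre)
    · exact Or.inl h.symm
    · right; rw [pv_prefix_iff_cut] at hpre
      obtain ⟨i, hi, hg, ht⟩ := hpre
      exact ⟨i, hi, by simp [hg, ht]⟩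

lemma pv_inter_ne_iff (path : List Char) :
    (PySem.Set.inter (pvCandidates path) pvAllPrefixes ≠ []) ↔
      ∃ n ∈ (pvPosixPrefixes.map (fun p => pvRstripSlash (PySem.Chars.lower p.toList))
        ++ pvWindowsPrefixes.map (fun p => pvRstripSlash p.toList)),
        (path = n ∨ (n ++ ['/']) <+: path) := by
  have h0 : (PySem.Set.inter (pvCandidates path) pvAllPrefixes ≠ []) ↔
      ∃ x, x ∈ pvCandidates path ∧ x ∈ pvAllPrefixes := by
    simp only [PySem.Set.inter, PySem.Set.contains_eq_listContains, List.contains_eq_mem, ne_eq,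
      List.filter_eq_nil_iff, decide_eq_true_eq, not_forall, Decidable.not_not, exists_prop]
  rw [h0]
  unfold pvAllPrefixes
  simp only [PySem.Set.mem_ofList, pv_mem_candidates]
  exact ⟨fun ⟨x, h1, h2⟩ => ⟨x, h2, h1⟩, fun ⟨x, h1, h2⟩ => ⟨x, h2, h1⟩⟩

lemma pv_loopPosix_eq (path : List Char) (L : List String) :
    pvLoopPosix path L =
      if L.any (fun p => path == pvRstripSlash (PySem.Chars.lower p.toList)
          || PySem.Chars.startswith path (pvRstripSlash (PySem.Chars.lower p.toList) ++ ['/']))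
      then some "system_path" else none := by
  induction L with
  | nil => rfl
  | cons p rest ih => simp only [pvLoopPosix, List.any_cons]; split_ifs with h <;> simp_all

lemma pv_loopWindows_eq (path : List Char) (L : List String) :
    pvLoopWindows path L =
      if L.any (fun p => path == pvRstripSlash p.toList
          || PySem.Chars.startswith path (pvRstripSlash p.toList ++ ['/']))
      then some "system_path" else none := by
  induction L with
  | nil => rfl
  | cons p rest ih => simp only [pvLoopWindows, List.any_cons]; split_ifs with h <;> simp_all

-- ===== VERDICT (by name: the statement is the Claim_ definition above) =====
theorem system_path_category_py_spec : Claim_equal_system_path_category_py := by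
  intro np _
  unfold Spec_system_path_category_py system_path_category_py system_path_category_py_alt
  rw [pv_loopPosix_eq, pv_loopWindows_eq]
  have hiff : (PySem.Set.inter (pvCandidates np.toList) pvAllPrefixes ≠ []) ↔
      ((pvPosixPrefixes.any (fun p => np.toList == pvRstripSlash (PySem.Chars.lower p.toList)
          || PySem.Chars.startswith np.toList (pvRstripSlash (PySem.Chars.lower p.toList) ++ ['/']))) = true
        ∨ (pvWindowsPrefixes.any (fun p => np.toList == pvRstripSlash p.toList
          || PySem.Chars.startswith np.toList (pvRstripSlash p.toList ++ ['/']))) = true) := by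
    rw [pv_inter_ne_iff]
    simp only [List.any_eq_true, List.mem_append, List.mem_map, Bool.or_eq_true, beq_iff_eq,
      PySem.Chars.startswith_iff]
    constructor
    · rintro ⟨n, (⟨p, hp, rfl⟩ | ⟨p, hp, rfl⟩), h⟩
      · exact Or.inl ⟨p, hp, h⟩
      · exact Or.inr ⟨p, hp, h⟩
    · rintro (⟨p, hp, h⟩ | ⟨p, hp, h⟩)
      · exact ⟨_, Or.inl ⟨p, hp, rfl⟩, h⟩
      · exact ⟨_, Or.inr ⟨p, hp, rfl⟩, h⟩
  split_ifs with h1 h2 h3 h4 <;> simp_all
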